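-- pv_equiv track=rewrite | github.com/AiZhanghan/Leetcode | 秋招/广联达/广联达_平行四边形构造.py | parallelogram
-- ===== SOURCE A (Python) =====
-- import collections
--
-- def parallelogram(nums):
--     """
--     Args:
--         nums: list[int]
--
--     Return:
--         int
--     """
--     counter = collections.Counter(nums)
--     max1 = 0
--     max2 = 0
--     for key, value in counter.items():
--         if value < 2:
--             continue
--         elif value < 4:
--             if key > max1:
--                 max2 = max1
--                 max1 = key
--             elif key > max2:
--                 max2 = key
--         else:
--             if key > max1:
--                 max2 = key
--                 max1 = key
--             if key > max2:
--                 max2 = key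
--
--     area = max1 * max2
--     return area if area != 0 else -1
-- ===== SOURCE B (Python) =====
-- import collections
--
-- def parallelogram(nums):
--     """
--     Args:
--         nums: list[int]
--
--     Return:
--         int
--     """
--     counter = collections.Counter(nums)
--     cands = []
--     for key, value in counter.items():
--         if key > 0 and value >= 2:
--             cands.append(key)
--             if value >= 4:
--                 cands.append(key)
--     cands.sort(reverse=True)
--     if len(cands) < 2:
--         return -1
--     return cands[0] * cands[1]
-- ===== Notes on version B (the rewrite author's own statement) =====
-- stated objective: alternative
-- what changed: Replaces A's running two-maxima scan over the counter with an explicit build-then-select pass: collect each positive length with count >= 2 as a candidate (twice when count >= 4), sort the candidates descending, and multiply the top two (returning -1 when fewer than two exist).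
import Mathlib
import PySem

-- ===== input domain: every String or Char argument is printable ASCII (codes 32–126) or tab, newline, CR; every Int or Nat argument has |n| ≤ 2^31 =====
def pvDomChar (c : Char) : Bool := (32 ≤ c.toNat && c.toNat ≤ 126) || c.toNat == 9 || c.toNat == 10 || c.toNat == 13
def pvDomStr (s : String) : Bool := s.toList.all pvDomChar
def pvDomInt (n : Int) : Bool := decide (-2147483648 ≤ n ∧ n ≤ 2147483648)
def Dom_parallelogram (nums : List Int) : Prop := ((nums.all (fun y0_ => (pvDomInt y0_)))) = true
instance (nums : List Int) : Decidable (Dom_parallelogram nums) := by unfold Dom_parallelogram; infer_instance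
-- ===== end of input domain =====

-- B builds the explicit list of usable pair-lengths (a length twice when it has two pairs),
-- sorts it descending and multiplies the top two, instead of A's running two-maxima scan
-- over the counter; objective: alternative decomposition (build-then-sort-then-select).


-- ===== PORT A =====
-- collections.Counter(nums) is PySem.Dict.counter; the for-loop over counter.items()
-- is a foldl over the (max1, max2) state with A's branch structure kept as written.
def parallelogram (nums : List Int) : Int :=
  let counter := PySem.Dict.counter nums
  let ms := counter.items.foldl (fun (s : Int × Int) (kv : Int × Int) =>
    let max1 := s.1
    let max2 := s.2
    let key := kv.1
    let value := kv.2
    if value < 2 then (max1, max2)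
    else if value < 4 then
      if key > max1 then (key, max1)
      else if key > max2 then (max1, key)
      else (max1, max2)
    else
      let s' := if key > max1 then (key, key) else (max1, max2)
      (s'.1, if key > s'.2 then key else s'.2)) (0, 0)
  let area := ms.1 * ms.2
  if area ≠ 0 then area else -1

-- ===== PORT B =====
-- Counter(nums); candidate list built by appending each positive key with count ≥ 2
-- (appended twice when count ≥ 4); list.sort(reverse=True) is PySem.List.sorted with
-- identity key and reverse := true; cands[0] / cands[1] are in range when length ≥ 2.
def parallelogram_alt (nums : List Int) : Int :=
  let counter := PySem.Dict.counter nums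
  let cands := counter.items.foldl (fun (acc : List Int) (kv : Int × Int) =>
    if kv.1 > 0 ∧ kv.2 ≥ 2 then acc ++ [kv.1] ++ (if kv.2 ≥ 4 then [kv.1] else []) else acc) []
  let cands := PySem.List.sorted cands (fun x => x) true
  if cands.length < 2 then -1
  else PySem.List.pyGetD cands 0 0 * PySem.List.pyGetD cands 1 0

-- ===== PRECONDITION & SPEC =====
def Spec_parallelogram (nums : List Int) (out : Int) : Prop := out = parallelogram_alt nums
instance (nums : List Int) (out : Int) : Decidable (Spec_parallelogram nums out) := by unfold Spec_parallelogram; infer_instance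

-- ===== CLAIM (what is proved, stated in full; the proofs are below) =====
def Claim_equal_parallelogram : Prop := ∀ (nums : List Int), Dom_parallelogram nums → Spec_parallelogram nums (parallelogram nums)

-- ===== LEMMAS AND PROOFS =====

-- "insert k into the two running maxima" — the common step both sides reduce to
def pvStep (s : Int × Int) (k : Int) : Int × Int :=
  if k > s.1 then (k, s.1) else if k > s.2 then (s.1, k) else s

-- the candidate chunk one counter item contributes in B
def pvChunk (kv : Int × Int) : List Int :=
  if kv.1 > 0 ∧ kv.2 ≥ 2 then [kv.1] ++ (if kv.2 ≥ 4 then [kv.1] else []) else []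

theorem pvStep_rcomm (s : Int × Int) (x y : Int) :
    pvStep (pvStep s x) y = pvStep (pvStep s y) x := by
  obtain ⟨a, b⟩ := s
  simp only [pvStep]
  split_ifs <;> simp_all [Prod.ext_iff] <;> omega

-- one iteration of A's loop body equals pvStep iterated over the item's chunk
theorem pvChunk_step (m1 m2 k v : Int) (hb : 0 ≤ m2) (ha : m2 ≤ m1) :
    (if v < 2 then (m1, m2)
     else if v < 4 then
       if k > m1 then (k, m1) else if k > m2 then (m1, k) else (m1, m2)
     else
       ((if k > m1 then (k, k) else (m1, m2)).1,
        if k > (if k > m1 then (k, k) else (m1, m2)).2 then k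
        else (if k > m1 then (k, k) else (m1, m2)).2))
    = (pvChunk (k, v)).foldl pvStep (m1, m2) := by
  by_cases hv2 : v < 2
  · have hnc : ¬(k > 0 ∧ v ≥ 2) := by omega
    simp [pvChunk, hnc, hv2]
  · by_cases hk : k > 0
    · by_cases hv4 : v < 4
      · have hc : k > 0 ∧ v ≥ 2 := ⟨hk, by omega⟩
        have h4 : ¬ (v ≥ 4) := by omega
        rw [if_neg hv2, if_pos hv4]
        simp only [pvChunk, if_pos hc, if_neg h4, List.append_nil, List.foldl_cons,
          List.foldl_nil]
        simp [pvStep]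
      · have hc : k > 0 ∧ v ≥ 2 := ⟨hk, by omega⟩
        have h4 : v ≥ 4 := by omega
        rw [if_neg hv2, if_neg hv4]
        simp only [pvChunk, if_pos hc, if_pos h4, List.singleton_append, List.foldl_cons,
          List.foldl_nil]
        by_cases h1 : k > m1
        · simp [pvStep, h1]
        · by_cases h2 : k > m2
          · simp [pvStep, h1, h2]
          · simp [pvStep, h1, h2]
    · have hnc : ¬(k > 0 ∧ v ≥ 2) := by omega
      have hm1 : ¬ k > m1 := by omega
      have hm2 : ¬ k > m2 := by omega
      rw [if_neg hv2]
      by_cases hv4 : v < 4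
      · rw [if_pos hv4, if_neg hm1, if_neg hm2]
        simp [pvChunk, hnc]
      · rw [if_neg hv4, if_neg hm1]
        simp [pvChunk, hnc, hm2]

-- pvStep preserves 0 ≤ snd ≤ fst
theorem pvStep_inv (l : List Int) :
    ∀ (m1 m2 : Int), 0 ≤ m2 → m2 ≤ m1 →
    0 ≤ (l.foldl pvStep (m1, m2)).2 ∧ (l.foldl pvStep (m1, m2)).2 ≤ (l.foldl pvStep (m1, m2)).1 := by
  induction l with
  | nil => intro m1 m2 hb ha; exact ⟨hb, ha⟩
  | cons x t ih =>
    intro m1 m2 hb ha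
    simp only [List.foldl_cons, pvStep]
    split_ifs with h1 h2
    · exact ih x m1 (by omega) (by omega)
    · exact ih m1 x (by omega) (by omega)
    · exact ih m1 m2 hb ha

-- A's fold equals pvStep over the concatenated chunks
theorem pvAfold (L : List (Int × Int)) :
    ∀ (m1 m2 : Int), 0 ≤ m2 → m2 ≤ m1 →
    L.foldl (fun (s : Int × Int) (kv : Int × Int) =>
      if kv.2 < 2 then (s.1, s.2)
      else if kv.2 < 4 then
        if kv.1 > s.1 then (kv.1, s.1) else if kv.1 > s.2 then (s.1, kv.1) else (s.1, s.2)
      else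
        ((if kv.1 > s.1 then (kv.1, kv.1) else (s.1, s.2)).1,
         if kv.1 > (if kv.1 > s.1 then (kv.1, kv.1) else (s.1, s.2)).2 then kv.1
         else (if kv.1 > s.1 then (kv.1, kv.1) else (s.1, s.2)).2)) (m1, m2)
    = (L.flatMap pvChunk).foldl pvStep (m1, m2) := by
  induction L with
  | nil => intro m1 m2 _ _; rfl
  | cons kv rest ih =>
    intro m1 m2 hb ha
    obtain ⟨k, v⟩ := kv
    simp only [List.foldl_cons, List.flatMap_cons, List.foldl_append]
    rw [pvChunk_step m1 m2 k v hb ha]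
    obtain ⟨h1, h2⟩ := pvStep_inv (pvChunk (k, v)) m1 m2 hb ha
    rw [ih _ _ h1 h2]

-- B's accumulation is the same concatenation of chunks
theorem pvBcands (L : List (Int × Int)) :
    L.foldl (fun (acc : List Int) (kv : Int × Int) =>
      if kv.1 > 0 ∧ kv.2 ≥ 2 then acc ++ [kv.1] ++ (if kv.2 ≥ 4 then [kv.1] else []) else acc) []
    = L.flatMap pvChunk := by
  have h : L.foldl (fun (acc : List Int) (kv : Int × Int) =>
      if kv.1 > 0 ∧ kv.2 ≥ 2 then acc ++ [kv.1] ++ (if kv.2 ≥ 4 then [kv.1] else []) else acc) []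
      = L.foldl (fun (acc : List Int) (kv : Int × Int) => acc ++ pvChunk kv) [] :=
    PySem.List.foldl_congr_mem L _ _ [] (by
      intro acc kv _
      simp only [pvChunk]
      split_ifs <;> simp)
  rw [h, PySem.List.foldl_append_eq_flatMap]
  simp

-- every candidate is positive
theorem pvChunk_pos (L : List (Int × Int)) (k : Int) (hk : k ∈ L.flatMap pvChunk) : 0 < k := by
  rcases List.mem_flatMap.mp hk with ⟨kv, _, hmem⟩
  simp only [pvChunk] at hmem
  split_ifs at hmem <;> simp_all

-- once every remaining element is ≤ m2, pvStep never changes the state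
theorem pvStep_noop (l : List Int) :
    ∀ (m1 m2 : Int), m2 ≤ m1 → (∀ k ∈ l, k ≤ m2) → l.foldl pvStep (m1, m2) = (m1, m2) := by
  induction l with
  | nil => intro _ _ _ _; rfl
  | cons x t ih =>
    intro m1 m2 h hle
    have hx : x ≤ m2 := hle x (by simp)
    simp only [List.foldl_cons, pvStep]
    rw [if_neg (by omega), if_neg (by omega)]
    exact ih m1 m2 h (fun k hk => hle k (by simp [hk]))

-- the two running maxima over a descending list of positives are its first two entries
theorem pvFold_sorted (s : List Int) (hpos : ∀ k ∈ s, 0 < k)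
    (hdesc : s.Pairwise (fun a b => b ≤ a)) :
    s.foldl pvStep (0, 0) =
      (match s with
       | [] => ((0 : Int), (0 : Int))
       | [x] => (x, 0)
       | x :: y :: _ => (x, y)) := by
  match s with
  | [] => rfl
  | [x] =>
    have hx : 0 < x := hpos x (by simp)
    simp [pvStep, hx]
  | x :: y :: rest =>
    have hx : 0 < x := hpos x (by simp)
    have hy : 0 < y := hpos y (by simp)
    have hyx : y ≤ x := (List.pairwise_cons.mp hdesc).1 y (by simp)
    have hrest : ∀ k ∈ rest, k ≤ y :=
      (List.pairwise_cons.mp (List.pairwise_cons.mp hdesc).2).1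
    simp only [List.foldl_cons]
    have h1 : pvStep (0, 0) x = (x, 0) := by simp [pvStep, hx]
    have h2 : pvStep (x, 0) y = (x, y) := by
      simp only [pvStep]
      rw [if_neg (by omega), if_pos (by omega)]
    rw [h1, h2]
    exact pvStep_noop rest x y hyx hrest

-- selecting the top two of the candidate list: A's final arithmetic vs B's sorted select
theorem pvFinal (C : List Int) (hpos : ∀ k ∈ C, 0 < k) :
    (if (C.foldl pvStep (0, 0)).1 * (C.foldl pvStep (0, 0)).2 ≠ 0
       then (C.foldl pvStep (0, 0)).1 * (C.foldl pvStep (0, 0)).2 else -1)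
    = (if (PySem.List.sorted C (fun x => x) true).length < 2 then -1
       else PySem.List.pyGetD (PySem.List.sorted C (fun x => x) true) 0 0 *
            PySem.List.pyGetD (PySem.List.sorted C (fun x => x) true) 1 0) := by
  have hperm : (PySem.List.sorted C (fun x => x) true).Perm C :=
    PySem.List.sorted_perm C (fun x => x) true
  have hdesc := PySem.List.sorted_pairwise_rev C (fun x => x)
  have hposS : ∀ k ∈ PySem.List.sorted C (fun x => x) true, 0 < k :=
    fun k hk => hpos k (hperm.mem_iff.mp hk)
  haveI : RightCommutative pvStep := ⟨pvStep_rcomm⟩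
  have hfold : C.foldl pvStep (0, 0) =
      (PySem.List.sorted C (fun x => x) true).foldl pvStep (0, 0) :=
    (hperm.foldl_eq (0, 0)).symm
  rw [hfold, pvFold_sorted _ hposS hdesc]
  rcases hS : PySem.List.sorted C (fun x => x) true with _ | ⟨x, _ | ⟨y, t⟩⟩
  · simp
  · simp
  · simp only [hS] at hposS
    have hx : 0 < x := hposS x (by simp)
    have hy : 0 < y := hposS y (by simp)
    have hne : x * y ≠ 0 := by positivity
    rw [if_pos hne]
    rw [if_neg (by simp)]
    simp [pysem]

-- ===== VERDICT (by name: the statement is the Claim_ definition above) =====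
theorem parallelogram_spec : Claim_equal_parallelogram := by
  intro nums _
  unfold Spec_parallelogram
  simp only [parallelogram, parallelogram_alt]
  rw [pvAfold ((PySem.Dict.counter nums).items) 0 0 le_rfl le_rfl,
      pvBcands ((PySem.Dict.counter nums).items)]
  exact pvFinal _ (pvChunk_pos _)
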